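-- pv_equiv track=rewrite | github.com/soujanyavullam/epic-web-app | backend/lambda_minimal/repo_documentation_generator.py | analyze_javascript_code
-- ===== SOURCE A (Python) =====
-- from typing import Dict, Any, List
--
-- def analyze_javascript_code(content: str, file_path: str) -> List[str]:
--     """Analyze JavaScript/TypeScript code and generate documentation."""
--     lines = content.split('\n')
--     documentation = []
--
--     # Extract imports
--     imports = []
--     for line in lines:
--         if line.strip().startswith(('import ', 'export ')):
--             imports.append(line.strip())
--
--     if imports:
--         documentation.append("**Imports/Exports:**")
--         documentation.extend([f"- {imp}" for imp in imports[:10]])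
--         documentation.append("")
--
--     # Extract classes
--     classes = []
--     for i, line in enumerate(lines):
--         if 'class ' in line and '{' in line:
--             class_name = line.strip().split('class ')[1].split('{')[0].split('extends')[0].strip()
--             classes.append((i, class_name, line.strip()))
--
--     if classes:
--         documentation.append("**Classes:**")
--         for line_num, class_name, class_line in classes[:5]:
--             documentation.append(f"- `{class_name}` (line {line_num + 1})")
--         documentation.append("")
--
--     # Extract functions
--     functions = []
--     for i, line in enumerate(lines):
--         if any(keyword in line for keyword in ['function ', '=>', 'const ', 'let ', 'var ']) and '(' in line and ')' in line:
--             # Extract function name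
--             if 'function ' in line:
--                 func_name = line.strip().split('function ')[1].split('(')[0].strip()
--             elif '=>' in line:
--                 func_name = f"arrow_function_{i}"
--             else:
--                 func_name = line.strip().split('(')[0].split('=')[0].strip()
--             functions.append((i, func_name, line.strip()))
--
--     if functions:
--         documentation.append("**Functions:**")
--         for line_num, func_name, func_line in functions[:8]:
--             documentation.append(f"- `{func_name}` (line {line_num + 1})")
--         documentation.append("")
--
--     # Generate code summary
--     total_lines = len(lines)
--     code_lines = len([line for line in lines if line.strip() and not line.strip().startswith('//')])
--     comment_lines = len([line for line in lines if line.strip().startswith('//')])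
--
--     documentation.append("**Code Summary:**")
--     documentation.append(f"- Total lines: {total_lines}")
--     documentation.append(f"- Code lines: {code_lines}")
--     documentation.append(f"- Comment lines: {comment_lines}")
--     documentation.append(f"- Classes: {len(classes)}")
--     documentation.append(f"- Functions: {len(functions)}")
--
--     return documentation
-- ===== SOURCE B (Python) =====
-- def analyze_javascript_code(content: str, file_path: str):
--     """Single-pass analysis: one enumerate loop classifies every line at once."""
--     imports = []
--     classes = []
--     functions = []
--     total_lines = 0
--     code_lines = 0
--     comment_lines = 0
--
--     for i, line in enumerate(content.split('\n')):
--         stripped = line.strip()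
--         total_lines += 1
--         if stripped.startswith('//'):
--             comment_lines += 1
--         elif stripped:
--             code_lines += 1
--         if stripped.startswith(('import ', 'export ')):
--             imports.append(stripped)
--         if 'class ' in line and '{' in line:
--             name = stripped.split('class ')[1].split('{')[0].split('extends')[0].strip()
--             classes.append((i, name))
--         if any(kw in line for kw in ('function ', '=>', 'const ', 'let ', 'var ')) and '(' in line and ')' in line:
--             if 'function ' in line:
--                 name = stripped.split('function ')[1].split('(')[0].strip()
--             elif '=>' in line:
--                 name = f"arrow_function_{i}"
--             else:
--                 name = stripped.split('(')[0].split('=')[0].strip()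
--             functions.append((i, name))
--
--     documentation = []
--     if imports:
--         documentation.append("**Imports/Exports:**")
--         documentation.extend(f"- {imp}" for imp in imports[:10])
--         documentation.append("")
--     if classes:
--         documentation.append("**Classes:**")
--         documentation.extend(f"- `{n}` (line {i + 1})" for i, n in classes[:5])
--         documentation.append("")
--     if functions:
--         documentation.append("**Functions:**")
--         documentation.extend(f"- `{n}` (line {i + 1})" for i, n in functions[:8])
--         documentation.append("")
--     documentation.append("**Code Summary:**")
--     documentation.append(f"- Total lines: {total_lines}")
--     documentation.append(f"- Code lines: {code_lines}")
--     documentation.append(f"- Comment lines: {comment_lines}")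
--     documentation.append(f"- Classes: {len(classes)}")
--     documentation.append(f"- Functions: {len(functions)}")
--     return documentation
-- ===== Notes on version B (the rewrite author's own statement) =====
-- stated objective: alternative
-- what changed: B replaces A's four separate scans over the lines (imports pass, classes pass, functions pass, and three summary list-comprehension passes) by a single enumerate loop that classifies each line once into all accumulators, then assembles the identical documentation; per-line predicates and formatting are byte-for-byte the same.
import Mathlib
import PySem

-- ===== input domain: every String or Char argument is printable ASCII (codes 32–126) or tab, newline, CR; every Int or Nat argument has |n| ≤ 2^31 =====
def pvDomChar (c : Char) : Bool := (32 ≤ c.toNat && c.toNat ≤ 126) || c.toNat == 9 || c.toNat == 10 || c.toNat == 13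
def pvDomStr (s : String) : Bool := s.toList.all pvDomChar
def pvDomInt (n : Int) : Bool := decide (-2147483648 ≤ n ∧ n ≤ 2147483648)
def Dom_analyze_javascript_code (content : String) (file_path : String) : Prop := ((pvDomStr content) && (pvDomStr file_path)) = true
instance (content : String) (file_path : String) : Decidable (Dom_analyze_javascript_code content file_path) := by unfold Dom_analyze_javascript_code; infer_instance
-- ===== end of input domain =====

-- B replaces A's four separate scans over the lines by ONE enumerate loop that classifies each
-- line once (imports, classes, functions, line counters), then assembles the same documentation;
-- objective: alternative single-pass decomposition (per-line predicates and formatting unchanged).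

-- ===== PORT A =====
-- shared helpers: Python string idioms both sources use verbatim
-- s.split(sep) for a non-empty literal sep (split? is some there; getD [] is never taken)
def pvSplit (s : String) (sep : String) : List String := (PySem.Str.split? s sep).getD []
-- xs[i] where Python would raise IndexError only outside Pre_ (getD "" never taken inside Pre_)
def pvIdx (xs : List String) (i : Int) : String := (PySem.List.pyGet? xs i).getD ""
-- f-string concatenation
def pvCat (xs : List String) : String := PySem.Str.join "" xs
-- the per-line predicates, byte-for-byte the same in A and B
def pvImpP (stripped : String) : Bool :=
  PySem.Str.startswith stripped "import " || PySem.Str.startswith stripped "export "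
def pvClsP (line : String) : Bool := PySem.Str.isIn "class " line && PySem.Str.isIn "{" line
def pvFnP (line : String) : Bool :=
  (PySem.Str.isIn "function " line || PySem.Str.isIn "=>" line || PySem.Str.isIn "const " line
    || PySem.Str.isIn "let " line || PySem.Str.isIn "var " line)
  && PySem.Str.isIn "(" line && PySem.Str.isIn ")" line
def pvComP (stripped : String) : Bool := PySem.Str.startswith stripped "//"
def pvCodeP (line : String) : Bool :=
  !(PySem.Str.strip line == "") && !(PySem.Str.startswith (PySem.Str.strip line) "//")
-- line.strip().split('class ')[1].split('{')[0].split('extends')[0].strip()  (takes the stripped line)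
def pvClassName (stripped : String) : String :=
  PySem.Str.strip (pvIdx (pvSplit (pvIdx (pvSplit (pvIdx (pvSplit stripped "class ") 1) "{") 0) "extends") 0)
-- the three-way function-name extraction (takes index, raw line and stripped line)
def pvFuncName (i : Int) (line : String) (stripped : String) : String :=
  if PySem.Str.isIn "function " line then
    PySem.Str.strip (pvIdx (pvSplit (pvIdx (pvSplit stripped "function ") 1) "(") 0)
  else if PySem.Str.isIn "=>" line then
    pvCat ["arrow_function_", PySem.Int.toStr i]
  else
    PySem.Str.strip (pvIdx (pvSplit (pvIdx (pvSplit stripped "(") 0) "=") 0)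

def analyze_javascript_code (content : String) (file_path : String) : List String :=
  let lines := pvSplit content "\n"
  let documentation : List String := []
  -- imports pass
  let imports := lines.foldl (fun acc line =>
      if pvImpP (PySem.Str.strip line) then acc ++ [PySem.Str.strip line] else acc) []
  let documentation := if imports ≠ [] then
      (documentation ++ ["**Imports/Exports:**"])
        ++ (PySem.List.slice imports none (some 10)).map (fun imp => pvCat ["- ", imp]) ++ [""]
    else documentation
  -- classes pass
  let classes := (PySem.List.enumerate lines).foldl (fun acc p =>
      if pvClsP p.2 then acc ++ [(p.1, pvClassName (PySem.Str.strip p.2), PySem.Str.strip p.2)] else acc) []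
  let documentation := if classes ≠ [] then
      (documentation ++ ["**Classes:**"])
        ++ (PySem.List.slice classes none (some 5)).map
             (fun c => pvCat ["- `", c.2.1, "` (line ", PySem.Int.toStr (c.1 + 1), ")"]) ++ [""]
    else documentation
  -- functions pass
  let functions := (PySem.List.enumerate lines).foldl (fun acc p =>
      if pvFnP p.2 then acc ++ [(p.1, pvFuncName p.1 p.2 (PySem.Str.strip p.2), PySem.Str.strip p.2)] else acc) []
  let documentation := if functions ≠ [] then
      (documentation ++ ["**Functions:**"])
        ++ (PySem.List.slice functions none (some 8)).map
             (fun c => pvCat ["- `", c.2.1, "` (line ", PySem.Int.toStr (c.1 + 1), ")"]) ++ [""]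
    else documentation
  -- summary passes
  let total_lines : Int := lines.length
  let code_lines : Int := (lines.filter pvCodeP).length
  let comment_lines : Int := (lines.filter (fun l => pvComP (PySem.Str.strip l))).length
  documentation
    ++ ["**Code Summary:**",
        pvCat ["- Total lines: ", PySem.Int.toStr total_lines],
        pvCat ["- Code lines: ", PySem.Int.toStr code_lines],
        pvCat ["- Comment lines: ", PySem.Int.toStr comment_lines],
        pvCat ["- Classes: ", PySem.Int.toStr classes.length],
        pvCat ["- Functions: ", PySem.Int.toStr functions.length]]

-- ===== PORT B =====
-- the single-pass accumulator of Source B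
structure PvSt where
  imports : List String
  classes : List (Int × String)
  functions : List (Int × String)
  total : Int
  code : Int
  comment : Int
deriving Repr, DecidableEq

-- one loop iteration of Source B (field updates are independent, in source order)
def pvStep (st : PvSt) (p : Int × String) : PvSt :=
  let i := p.1
  let line := p.2
  let stripped := PySem.Str.strip line
  { total := st.total + 1,
    comment := if pvComP stripped then st.comment + 1 else st.comment,
    code := if pvComP stripped then st.code
            else if stripped != "" then st.code + 1 else st.code,
    imports := if pvImpP stripped then st.imports ++ [stripped] else st.imports,
    classes := if pvClsP line then st.classes ++ [(i, pvClassName stripped)] else st.classes,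
    functions := if pvFnP line then st.functions ++ [(i, pvFuncName i line stripped)] else st.functions }

def analyze_javascript_code_alt (content : String) (file_path : String) : List String :=
  let st := (PySem.List.enumerate (pvSplit content "\n")).foldl pvStep
              { imports := [], classes := [], functions := [], total := 0, code := 0, comment := 0 }
  let documentation : List String := []
  let documentation := if st.imports ≠ [] then
      (documentation ++ ["**Imports/Exports:**"])
        ++ (PySem.List.slice st.imports none (some 10)).map (fun imp => pvCat ["- ", imp]) ++ [""]
    else documentation
  let documentation := if st.classes ≠ [] then
      (documentation ++ ["**Classes:**"])
        ++ (PySem.List.slice st.classes none (some 5)).map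
             (fun c => pvCat ["- `", c.2, "` (line ", PySem.Int.toStr (c.1 + 1), ")"]) ++ [""]
    else documentation
  let documentation := if st.functions ≠ [] then
      (documentation ++ ["**Functions:**"])
        ++ (PySem.List.slice st.functions none (some 8)).map
             (fun c => pvCat ["- `", c.2, "` (line ", PySem.Int.toStr (c.1 + 1), ")"]) ++ [""]
    else documentation
  documentation
    ++ ["**Code Summary:**",
        pvCat ["- Total lines: ", PySem.Int.toStr st.total],
        pvCat ["- Code lines: ", PySem.Int.toStr st.code],
        pvCat ["- Comment lines: ", PySem.Int.toStr st.comment],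
        pvCat ["- Classes: ", PySem.Int.toStr st.classes.length],
        pvCat ["- Functions: ", PySem.Int.toStr st.functions.length]]

-- ===== PRECONDITION & SPEC =====
-- Pre_ excludes exactly the inputs on which A (and B) raise IndexError: a line that contains
-- 'class ' (resp. 'function ') only in trailing position removed by strip(), while the other
-- trigger substrings ('{' resp. '(' and ')') are present, makes split(...)[1] go out of range.
def Pre_analyze_javascript_code (content : String) (file_path : String) : Prop :=
  ∀ line ∈ (PySem.Str.split? content "\n").getD [],
    (PySem.Str.isIn "class " line = true ∧ PySem.Str.isIn "{" line = true →
      PySem.Str.isIn "class " (PySem.Str.strip line) = true) ∧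
    (PySem.Str.isIn "function " line = true ∧ PySem.Str.isIn "(" line = true ∧
        PySem.Str.isIn ")" line = true →
      PySem.Str.isIn "function " (PySem.Str.strip line) = true)
instance (content : String) (file_path : String) : Decidable (Pre_analyze_javascript_code content file_path) := by
  unfold Pre_analyze_javascript_code; infer_instance

def pvWitness_analyze_javascript_code : String × String :=
  ("import x from 'y'\nclass A extends B {\n// note\nconst f = (a) => a\n", "app.js")

def Spec_analyze_javascript_code (content : String) (file_path : String) (out : List String) : Prop :=
  out = analyze_javascript_code_alt content file_path
instance (content : String) (file_path : String) (out : List String) : Decidable (Spec_analyze_javascript_code content file_path out) := by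
  unfold Spec_analyze_javascript_code; infer_instance

-- ===== CLAIM (what is proved, stated in full; the proofs are below) =====
def Claim_equal_analyze_javascript_code : Prop := ∀ (content : String) (file_path : String), Dom_analyze_javascript_code content file_path → Pre_analyze_javascript_code content file_path → Spec_analyze_javascript_code content file_path (analyze_javascript_code content file_path)

-- ===== LEMMAS AND PROOFS =====

-- the fused fold of B computes A's four passes at once
theorem pvFold_eq (L : List String) (s : Int) (st : PvSt) :
    (PySem.List.enumerate L s).foldl pvStep st =
      { imports := st.imports ++ (L.filter (fun l => pvImpP (PySem.Str.strip l))).map PySem.Str.strip,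
        classes := st.classes ++ ((PySem.List.enumerate L s).filter (fun p => pvClsP p.2)).map
                     (fun p => (p.1, pvClassName (PySem.Str.strip p.2))),
        functions := st.functions ++ ((PySem.List.enumerate L s).filter (fun p => pvFnP p.2)).map
                     (fun p => (p.1, pvFuncName p.1 p.2 (PySem.Str.strip p.2))),
        total := st.total + L.length,
        code := st.code + L.countP pvCodeP,
        comment := st.comment + L.countP (fun l => pvComP (PySem.Str.strip l)) } := by
  induction L generalizing s st with
  | nil =>
      simp [PySem.List.enumerate]
  | cons x xs ih =>
      rw [PySem.List.enumerate_cons, List.foldl_cons, ih]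
      simp only [pvStep, PvSt.mk.injEq, List.filter_cons, List.countP_cons, List.length_cons]
      refine ⟨?_, ?_, ?_, by push_cast; omega, ?_, ?_⟩
      · by_cases h : pvImpP (PySem.Str.strip x) <;> simp [h]
      · by_cases h : pvClsP x <;> simp [h]
      · by_cases h : pvFnP x <;> simp [h]
      · -- code counter
        rw [show pvCodeP x = (!(PySem.Str.strip x == "") && !pvComP (PySem.Str.strip x)) from rfl]
        by_cases hc : pvComP (PySem.Str.strip x) <;>
          by_cases hn : ((PySem.Str.strip x) == "") = true <;>
          simp [bne, hc, hn] <;> push_cast <;> omega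
      · -- comment counter
        by_cases hc : pvComP (PySem.Str.strip x) <;>
          simp [hc] <;> push_cast <;> omega

theorem analyze_javascript_code_spec : Claim_equal_analyze_javascript_code := by
  intro content file_path _ _
  unfold Spec_analyze_javascript_code
  simp only [analyze_javascript_code, analyze_javascript_code_alt]
  rw [pvFold_eq]
  simp only [PySem.List.foldl_append_if]
  simp only [List.nil_append,
    PySem.List.slice_to _ (by norm_num : (0:Int) ≤ 10),
    PySem.List.slice_to _ (by norm_num : (0:Int) ≤ 5),
    PySem.List.slice_to _ (by norm_num : (0:Int) ≤ 8),
    Int.reduceToNat, List.map_take, List.map_map, List.length_map,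
    List.countP_eq_length_filter, Function.comp_def, zero_add]
  have h1 : (List.map (fun p => (p.1, pvClassName (PySem.Str.strip p.2), PySem.Str.strip p.2))
      (List.filter (fun x => pvClsP x.2) (PySem.List.enumerate (pvSplit content "\n"))) = []) =
      ((List.filter (fun x => pvClsP x.2) (PySem.List.enumerate (pvSplit content "\n"))) = []) := by
    simp [List.map_eq_nil_iff]
  have h2 : (List.map (fun p => (p.1, pvFuncName p.1 p.2 (PySem.Str.strip p.2), PySem.Str.strip p.2))
      (List.filter (fun x => pvFnP x.2) (PySem.List.enumerate (pvSplit content "\n"))) = []) =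
      ((List.filter (fun x => pvFnP x.2) (PySem.List.enumerate (pvSplit content "\n"))) = []) := by
    simp [List.map_eq_nil_iff]
  have h3 : (List.map (fun p => (p.1, pvClassName (PySem.Str.strip p.2)))
      (List.filter (fun x => pvClsP x.2) (PySem.List.enumerate (pvSplit content "\n"))) = []) =
      ((List.filter (fun x => pvClsP x.2) (PySem.List.enumerate (pvSplit content "\n"))) = []) := by
    simp [List.map_eq_nil_iff]
  have h4 : (List.map (fun p => (p.1, pvFuncName p.1 p.2 (PySem.Str.strip p.2)))
      (List.filter (fun x => pvFnP x.2) (PySem.List.enumerate (pvSplit content "\n"))) = []) =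
      ((List.filter (fun x => pvFnP x.2) (PySem.List.enumerate (pvSplit content "\n"))) = []) := by
    simp [List.map_eq_nil_iff]
  simp only [ne_eq, h1, h2, h3, h4]
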